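-- pv_equiv track=rewrite | github.com/rraniwala/cmsc-uchicago | cmsc12100/timed-exercises-24raniwalar/exercise1.py | predicted_coins
-- ===== SOURCE A (Python) =====
-- def predicted_coins(max_per_side, guesses_to_win, seq):
--     """
--     Determines whether your friend wins the guessing game.
--     Your friend wins if they make at least guess_to_win
--     correct predictions by the time the game ends. The game
--     ends when there have been max_per_side heads or
--     max_per_side tails, even if the end of the sequence seq
--     has not been reached. Barring either of those
--     conditions, the game also ends at the end of the
--     sequence.
--
--     Inputs:
--       max_per_side: (int) the game ends when this many
--         heads appear or when this many tails appear.
--       guesses_to_win: (int) your friend wins if they make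
--         this many correct guesses by the time the game ends.
--       seq: a list of pairs (flip, guess), where flip and
--         guess are each either "H" or "T". Here, flip is the
--         actual outcome of the coin flip, while guess is what
--         your friend guessed. This list may be long.
--
--     Returns: boolean indicating whether your friend wins.
--     """
--     total_heads = 0
--     total_tails = 0
--     total_wins = 0
--     for flip, guess in seq:
--         if flip == "H":
--             total_heads += 1
--         else:
--             total_tails += 1
--         if flip == guess:
--             total_wins += 1
--
--         if total_heads == max_per_side or total_tails == max_per_side:
--             return total_wins >= guesses_to_win
--
--     return total_wins >= guesses_to_win
-- ===== SOURCE B (Python) =====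
-- def predicted_coins(max_per_side, guesses_to_win, seq):
--     # Phase 1: locate the end of the game (index after the triggering flip,
--     # or len(seq) if no threshold is ever reached).
--     heads = tails = end = 0
--     for flip, _ in seq:
--         end += 1
--         if flip == "H":
--             heads += 1
--         else:
--             tails += 1
--         if heads == max_per_side or tails == max_per_side:
--             break
--     # Phase 2: tally correct guesses over the played prefix.
--     return sum(1 for flip, guess in seq[:end] if flip == guess) >= guesses_to_win
-- ===== Notes on version B (the rewrite author's own statement) =====
-- stated objective: alternative
-- what changed: Replaced A's single interleaved count-check-early-return loop with a two-phase structure: first a scan that only locates the game's cutoff index, then a separate tally of correct guesses over the bounded prefix seq[:end].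
import Mathlib
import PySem

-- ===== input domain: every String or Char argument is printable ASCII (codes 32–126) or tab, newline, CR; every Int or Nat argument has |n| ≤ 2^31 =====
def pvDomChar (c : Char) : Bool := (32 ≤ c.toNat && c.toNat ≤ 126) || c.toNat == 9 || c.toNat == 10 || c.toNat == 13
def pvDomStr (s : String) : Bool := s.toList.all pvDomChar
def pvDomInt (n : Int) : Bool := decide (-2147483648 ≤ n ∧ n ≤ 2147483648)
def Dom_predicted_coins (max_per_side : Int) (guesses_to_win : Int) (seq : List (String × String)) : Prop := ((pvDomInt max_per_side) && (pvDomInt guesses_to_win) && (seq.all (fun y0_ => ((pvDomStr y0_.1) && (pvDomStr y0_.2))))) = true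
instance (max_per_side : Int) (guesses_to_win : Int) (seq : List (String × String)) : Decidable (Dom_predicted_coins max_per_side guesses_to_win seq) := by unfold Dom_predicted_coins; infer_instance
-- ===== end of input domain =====

-- B replaces A's interleaved count-check-early-return loop with a two-phase
-- "locate the cutoff index, then tally correct guesses over that prefix" structure (objective: alternative).


-- ===== PORT A =====
-- A's single loop: update heads/tails and wins, return early when a side hits max_per_side.
def pcLoopA (max_per_side guesses_to_win : Int) :
    List (String × String) → Int → Int → Int → Bool
  | [], _, _, total_wins => decide (total_wins ≥ guesses_to_win)
  | (flip, guess) :: rest, total_heads, total_tails, total_wins =>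
    let total_heads' := if flip = "H" then total_heads + 1 else total_heads
    let total_tails' := if flip = "H" then total_tails else total_tails + 1
    let total_wins' := if flip = guess then total_wins + 1 else total_wins
    if total_heads' = max_per_side ∨ total_tails' = max_per_side then
      decide (total_wins' ≥ guesses_to_win)
    else
      pcLoopA max_per_side guesses_to_win rest total_heads' total_tails' total_wins'

def predicted_coins (max_per_side : Int) (guesses_to_win : Int) (seq : List (String × String)) : Bool :=
  pcLoopA max_per_side guesses_to_win seq 0 0 0

-- ===== PORT B =====
-- B phase 1: find the cutoff index `end` (accumulator e counts consumed flips).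
def pcCut (max_per_side : Int) :
    List (String × String) → Int → Int → Nat → Nat
  | [], _, _, e => e
  | (flip, _) :: rest, heads, tails, e =>
    let e' := e + 1
    let heads' := if flip = "H" then heads + 1 else heads
    let tails' := if flip = "H" then tails else tails + 1
    if heads' = max_per_side ∨ tails' = max_per_side then e'
    else pcCut max_per_side rest heads' tails' e'

def predicted_coins_alt (max_per_side : Int) (guesses_to_win : Int) (seq : List (String × String)) : Bool :=
  let e := pcCut max_per_side seq 0 0 0
  decide ((((seq.take e).countP (fun p => p.1 == p.2) : Int)) ≥ guesses_to_win)

-- ===== PRECONDITION & SPEC =====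
def Spec_predicted_coins (max_per_side : Int) (guesses_to_win : Int) (seq : List (String × String)) (out : Bool) : Prop := out = predicted_coins_alt max_per_side guesses_to_win seq
instance (max_per_side : Int) (guesses_to_win : Int) (seq : List (String × String)) (out : Bool) : Decidable (Spec_predicted_coins max_per_side guesses_to_win seq out) := by unfold Spec_predicted_coins; infer_instance

-- ===== CLAIM (what is proved, stated in full; the proofs are below) =====
def Claim_equal_predicted_coins : Prop := ∀ (max_per_side : Int) (guesses_to_win : Int) (seq : List (String × String)), Dom_predicted_coins max_per_side guesses_to_win seq → Spec_predicted_coins max_per_side guesses_to_win seq (predicted_coins max_per_side guesses_to_win seq)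

-- ===== LEMMAS AND PROOFS =====

-- the accumulator of pcCut only shifts the result
theorem pcCut_acc (m : Int) (l : List (String × String)) :
    ∀ h t e, pcCut m l h t e = e + pcCut m l h t 0 := by
  induction l with
  | nil => intro h t e; simp [pcCut]
  | cons x rest ih =>
    intro h t e
    obtain ⟨flip, guess⟩ := x
    simp only [pcCut]
    split_ifs <;> first
      | omega
      | (rw [ih, ih _ _ (0 + 1)]; omega)

theorem pcCut_acc1 (m : Int) (l : List (String × String)) (h t : Int) :
    pcCut m l h t (0 + 1) = 1 + pcCut m l h t 0 := by
  rw [pcCut_acc m l h t (0 + 1)]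

theorem pcTake_one_add {α : Type} (a : α) (l : List α) (n : Nat) :
    (a :: l).take (1 + n) = a :: l.take n := by
  rw [Nat.add_comm, List.take_succ_cons]

-- the core invariant: A's loop equals the tally over the prefix B selects
theorem pcLoopA_eq (m g : Int) (l : List (String × String)) :
    ∀ h t w, pcLoopA m g l h t w
      = decide ((w + (((l.take (pcCut m l h t 0)).countP (fun p => p.1 == p.2) : Int))) ≥ g) := by
  induction l with
  | nil => intro h t w; simp [pcLoopA, pcCut]
  | cons x rest ih =>
    intro h t w
    obtain ⟨flip, guess⟩ := x
    simp only [pcLoopA, pcCut]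
    split_ifs <;>
      (try rw [ih, pcCut_acc1, pcTake_one_add]) <;>
      simp_all [decide_eq_decide] <;>
      omega

-- ===== VERDICT (by name: the statement is the Claim_ definition above) =====
theorem predicted_coins_spec : Claim_equal_predicted_coins := by
  intro m g seq _
  unfold Spec_predicted_coins predicted_coins predicted_coins_alt
  rw [pcLoopA_eq]
  simp
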